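-- pv_equiv track=rewrite | github.com/sosanzma/spade_llm | spade_llm/context/_types.py | _sanitize_jid_for_name
-- ===== SOURCE A (Python) =====
-- def _sanitize_jid_for_name(jid: str) -> str:
--     """
--     Sanitize an XMPP JID for use as an OpenAI message name field.
--
--     OpenAI name fields cannot contain: whitespace, <, |, \, /, >
--     This function replaces these characters with underscores and removes the resource
--     part of the JID if present.
--
--     Args:
--         jid: The XMPP JID to sanitize
--
--     Returns:
--         Sanitized name suitable for OpenAI message name field
--     """
--     # Remove resource part (everything after /) if present
--     if "/" in jid:
--         jid = jid.split("/")[0]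
--
--     # Replace forbidden characters with underscores
--     forbidden_chars = [" ", "\t", "\n", "\r", "<", "|", "\\", "/", ">"]
--     sanitized = jid
--     for char in forbidden_chars:
--         sanitized = sanitized.replace(char, "_")
--
--     return sanitized
-- ===== SOURCE B (Python) =====
-- def _sanitize_jid_for_name(jid: str) -> str:
--     """Sanitize an XMPP JID for use as an OpenAI message name field."""
--     head = jid.split("/")[0]
--     forbidden = {" ", "\t", "\n", "\r", "<", "|", "\\", "/", ">"}
--     return "".join("_" if c in forbidden else c for c in head)
-- ===== Notes on version B (the rewrite author's own statement) =====
-- stated objective: idiomatic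
-- what changed: Replaces the nine sequential full-string replace passes (run after a conditional split) with an unconditional take-the-part-before-the-slash-separator step followed by a single left-to-right pass mapping each character through a forbidden-set membership test.
import Mathlib
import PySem

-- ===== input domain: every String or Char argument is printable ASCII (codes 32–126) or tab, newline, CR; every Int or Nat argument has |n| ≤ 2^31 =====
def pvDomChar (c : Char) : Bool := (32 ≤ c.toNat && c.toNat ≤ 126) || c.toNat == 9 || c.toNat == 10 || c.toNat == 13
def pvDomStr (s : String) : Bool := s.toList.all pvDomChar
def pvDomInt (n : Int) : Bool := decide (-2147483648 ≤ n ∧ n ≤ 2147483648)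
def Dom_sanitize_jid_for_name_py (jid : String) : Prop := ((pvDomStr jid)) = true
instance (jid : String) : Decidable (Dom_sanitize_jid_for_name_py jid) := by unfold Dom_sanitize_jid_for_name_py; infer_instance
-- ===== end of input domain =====

-- B replaces A's nine sequential full-string replace passes (after a conditional split)
-- with an unconditional split("/")[0] and ONE pass mapping each character through a
-- forbidden-set membership test; objective: idiomatic, same exact result.

-- ===== PORT A =====
-- port of: if "/" in jid: jid = jid.split("/")[0]; then 9 sequential .replace(c, "_")
-- jid.split("/") with nonempty separator never raises and never returns an empty list,
-- so the Option/headD defaults below are unreachable.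
def sanitize_jid_for_name_py (jid : String) : String :=
  let jid1 :=
    if PySem.Str.isIn "/" jid then
      ((PySem.Str.split? jid "/").getD []).headD ""
    else jid
  let forbidden : List String := [" ", "\t", "\n", "\r", "<", "|", "\\", "/", ">"]
  forbidden.foldl (fun s c => PySem.Str.replace s c "_") jid1

-- ===== PORT B =====
-- port of Source B: head = jid.split("/")[0]; ''.join('_' if c in forbidden else c for c in head)
def sanitize_jid_for_name_py_alt (jid : String) : String :=
  let head := ((PySem.Str.split? jid "/").getD []).headD ""
  let forbidden : List Char := [' ', '\t', '\n', '\r', '<', '|', '\\', '/', '>']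
  String.ofList (head.toList.map (fun c => if c ∈ forbidden then '_' else c))

-- ===== PRECONDITION & SPEC =====
def Spec_sanitize_jid_for_name_py (jid : String) (out : String) : Prop := out = sanitize_jid_for_name_py_alt jid
instance (jid : String) (out : String) : Decidable (Spec_sanitize_jid_for_name_py jid out) := by unfold Spec_sanitize_jid_for_name_py; infer_instance

-- ===== CLAIM (what is proved, stated in full; the proofs are below) =====
def Claim_equal_sanitize_jid_for_name_py : Prop := ∀ (jid : String), Dom_sanitize_jid_for_name_py jid → Spec_sanitize_jid_for_name_py jid (sanitize_jid_for_name_py jid)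

-- ===== LEMMAS AND PROOFS =====

-- replace.go with a single-character pattern is a pointwise substitution
theorem replace_go_single (c : Char) (new : List Char) :
    ∀ (l : List Char) (fuel : Nat) (acc : List Char), l.length ≤ fuel →
      PySem.Chars.replace.go [c] new fuel l acc
        = acc.reverse ++ l.flatMap (fun x => if x = c then new else [x]) := by
  intro l
  induction l with
  | nil =>
      intro fuel acc _
      cases fuel <;> simp [PySem.Chars.replace.go]
  | cons x t ih =>
      intro fuel acc hle
      cases fuel with
      | zero => simp at hle
      | succ f =>
        have hle' : t.length ≤ f := by simpa using Nat.le_of_succ_le_succ hle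
        by_cases hx : x = c
        · subst hx
          have hpre : ([x].isPrefixOf (x :: t)) = true := by simp [List.isPrefixOf]
          simp only [PySem.Chars.replace.go, hpre, if_true, List.length_cons,
            List.length_nil, List.drop_succ_cons, List.drop_zero]
          rw [ih f (new.reverse ++ acc) hle']
          simp
        · have hpre : ([c].isPrefixOf (x :: t)) = false := by
            simp [List.isPrefixOf]; exact fun h => (hx h.symm).elim
          simp only [PySem.Chars.replace.go, hpre, Bool.false_eq_true, if_false]
          rw [ih f (x :: acc) hle']
          simp [hx]

-- pointwise substitution of one character
def substc (c y : Char) : Char := if y = c then '_' else y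

-- Chars.replace with a single-character pattern is List.map of a substitution
theorem replace_single (l : List Char) (c : Char) :
    PySem.Chars.replace l [c] ['_'] = l.map (substc c) := by
  rw [show PySem.Chars.replace l [c] ['_']
        = PySem.Chars.replace.go [c] ['_'] l.length l [] from by
      simp [PySem.Chars.replace]]
  rw [replace_go_single c ['_'] l l.length [] (Nat.le_refl _)]
  simp only [List.reverse_nil, List.nil_append]
  induction l with
  | nil => rfl
  | cons x t ih => by_cases hx : x = c <;> simp [substc, hx, ih]

-- splitOn.go never returns the empty list
theorem splitOn_go_ne_nil (c : Char) :
    ∀ (fuel : Nat) (l cur : List Char) (acc : List (List Char)),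
      PySem.Chars.splitOn.go [c] fuel l cur acc ≠ [] := by
  intro fuel
  induction fuel with
  | zero => intro l cur acc; simp [PySem.Chars.splitOn.go]
  | succ f ih =>
      intro l cur acc
      cases l with
      | nil => simp [PySem.Chars.splitOn.go]
      | cons x t =>
          simp only [PySem.Chars.splitOn.go]
          split
          · exact ih _ _ _
          · exact ih _ _ _

-- splitOn.go: the accumulator of finished pieces factors out
theorem splitOn_go_acc (c : Char) :
    ∀ (l : List Char) (fuel : Nat) (cur : List Char) (acc : List (List Char)),
      l.length ≤ fuel →
      PySem.Chars.splitOn.go [c] fuel l cur acc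
        = acc.reverse ++ PySem.Chars.splitOn.go [c] fuel l cur [] := by
  intro l
  induction l with
  | nil =>
      intro fuel cur acc _
      cases fuel <;> simp [PySem.Chars.splitOn.go]
  | cons x t ih =>
      intro fuel cur acc hle
      cases fuel with
      | zero => simp at hle
      | succ f =>
        have hle' : t.length ≤ f := by simpa using Nat.le_of_succ_le_succ hle
        by_cases hx : x = c
        · subst hx
          have hpre : ([x].isPrefixOf (x :: t)) = true := by simp [List.isPrefixOf]
          simp only [PySem.Chars.splitOn.go, hpre, if_true, List.length_cons,
            List.length_nil, List.drop_succ_cons, List.drop_zero]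
          rw [ih f [] (cur.reverse :: acc) hle', ih f [] [cur.reverse] hle']
          simp
        · have hpre : ([c].isPrefixOf (x :: t)) = false := by
            simp [List.isPrefixOf]; exact fun h => (hx h.symm).elim
          simp only [PySem.Chars.splitOn.go, hpre, Bool.false_eq_true, if_false]
          exact ih f (x :: cur) acc hle'

-- the first piece of splitOn.go … [] is cur.reverse ++ takeWhile (· ≠ c)
theorem splitOn_go_head (c : Char) :
    ∀ (l : List Char) (fuel : Nat) (cur : List Char), l.length ≤ fuel →
      (PySem.Chars.splitOn.go [c] fuel l cur []).headD []
        = cur.reverse ++ l.takeWhile (· ≠ c) := by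
  intro l
  induction l with
  | nil =>
      intro fuel cur _
      cases fuel <;> simp [PySem.Chars.splitOn.go]
  | cons x t ih =>
      intro fuel cur hle
      cases fuel with
      | zero => simp at hle
      | succ f =>
        have hle' : t.length ≤ f := by simpa using Nat.le_of_succ_le_succ hle
        by_cases hx : x = c
        · subst hx
          have hpre : ([x].isPrefixOf (x :: t)) = true := by simp [List.isPrefixOf]
          simp only [PySem.Chars.splitOn.go, hpre, if_true, List.length_cons,
            List.length_nil, List.drop_succ_cons, List.drop_zero]
          rw [splitOn_go_acc x t f [] [cur.reverse] hle']
          cases hgo : PySem.Chars.splitOn.go [x] f t [] [] with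
          | nil => exact absurd hgo (splitOn_go_ne_nil x f t [] [])
          | cons h r => simp [List.takeWhile]
        · have hpre : ([c].isPrefixOf (x :: t)) = false := by
            simp [List.isPrefixOf]; exact fun h => (hx h.symm).elim
          simp only [PySem.Chars.splitOn.go, hpre, Bool.false_eq_true, if_false]
          rw [ih f (x :: cur) hle']
          simp [List.takeWhile, hx]

-- the first piece of a single-character split
theorem splitOn_head (l : List Char) (c : Char) :
    (PySem.Chars.splitOn l [c]).headD [] = l.takeWhile (· ≠ c) := by
  have := splitOn_go_head c l (l.length + 1) [] (Nat.le_succ _)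
  simpa [PySem.Chars.splitOn] using this

theorem takeWhile_of_not_mem (l : List Char) (c : Char) (h : c ∉ l) :
    l.takeWhile (· ≠ c) = l := by
  induction l with
  | nil => rfl
  | cons x t ih =>
      simp only [List.mem_cons, not_or] at h
      rw [List.takeWhile_cons_of_pos (by simp [Ne.symm h.1])]
      rw [ih h.2]

-- the 9-fold composed substitution equals the single membership test
theorem subst_compose (x : Char) :
    substc '>' (substc '/' (substc '\\' (substc '|' (substc '<' (substc '\r' (substc '\n'
      (substc '\t' (substc ' ' x)))))))) =
    (if x ∈ [' ', '\t', '\n', '\r', '<', '|', '\\', '/', '>'] then '_' else x) := by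
  by_cases hmem : x ∈ [' ', '\t', '\n', '\r', '<', '|', '\\', '/', '>']
  · rw [if_pos hmem]
    rcases (by simpa using hmem :
        x = ' ' ∨ x = '\t' ∨ x = '\n' ∨ x = '\r' ∨ x = '<' ∨ x = '|' ∨ x = '\\' ∨
          x = '/' ∨ x = '>') with h|h|h|h|h|h|h|h|h <;> subst h <;> decide
  · rw [if_neg hmem]
    simp only [List.mem_cons, List.not_mem_nil, or_false, not_or] at hmem
    obtain ⟨n1, n2, n3, n4, n5, n6, n7, n8, n9⟩ := hmem
    simp [substc, n1, n2, n3, n4, n5, n6, n7, n8, n9]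

-- the nine maps collapse to one map with the membership test
theorem chainL (l : List Char) :
    ((((((((l.map (substc ' ')).map (substc '\t')).map (substc '\n')).map (substc '\r')).map
      (substc '<')).map (substc '|')).map (substc '\\')).map (substc '/')).map (substc '>')
      = l.map (fun x => if x ∈ [' ', '\t', '\n', '\r', '<', '|', '\\', '/', '>'] then '_' else x) := by
  induction l with
  | nil => rfl
  | cons x t ih =>
      simp only [List.map_cons]
      exact List.cons_eq_cons.mpr ⟨subst_compose x, ih⟩

-- A's replace chain on a string s equals B's single map on s.toList
theorem chain_eq_map (s : String) :
    ([" ", "\t", "\n", "\r", "<", "|", "\\", "/", ">"].foldl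
        (fun t c => PySem.Str.replace t c "_") s)
      = String.ofList (s.toList.map
          (fun x => if x ∈ [' ', '\t', '\n', '\r', '<', '|', '\\', '/', '>'] then '_' else x)) := by
  simp only [List.foldl]
  have step : ∀ (t cs : String) (c : Char), cs.toList = [c] →
      PySem.Str.replace t cs "_" = String.ofList (t.toList.map (substc c)) := by
    intro t cs c hc
    apply String.toList_inj.mp
    rw [PySem.Str.toList_replace, hc]
    simp [replace_single]
  rw [step _ " " ' ' rfl, step _ "\t" '\t' rfl, step _ "\n" '\n' rfl, step _ "\r" '\r' rfl,
    step _ "<" '<' rfl, step _ "|" '|' rfl, step _ "\\" '\\' rfl, step _ "/" '/' rfl,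
    step _ ">" '>' rfl]
  simp only [String.toList_ofList]
  rw [chainL]

theorem main_equiv (jid : String) :
    sanitize_jid_for_name_py jid = sanitize_jid_for_name_py_alt jid := by
  unfold sanitize_jid_for_name_py sanitize_jid_for_name_py_alt
  have hsep : (("/" : String).toList) = ['/'] := rfl
  have hsplit : PySem.Str.split? jid "/"
      = some ((PySem.Chars.splitOn jid.toList ['/']).map String.ofList) := by
    simp [PySem.Str.split?, PySem.Chars.split?, hsep]
  have hheadL : (PySem.Chars.splitOn jid.toList ['/']).headD []
      = jid.toList.takeWhile (· ≠ '/') := splitOn_head _ _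
  have hhead : ((PySem.Chars.splitOn jid.toList ['/']).map String.ofList).headD ""
      = String.ofList (jid.toList.takeWhile (· ≠ '/')) := by
    cases h : PySem.Chars.splitOn jid.toList ['/'] with
    | nil =>
        exact absurd (by simpa [PySem.Chars.splitOn] using h)
          (splitOn_go_ne_nil '/' (jid.toList.length + 1) jid.toList [] [])
    | cons a r =>
        rw [h] at hheadL
        simp only [List.headD_cons] at hheadL
        simp [hheadL]
  rw [hsplit]
  simp only [Option.getD_some, hhead]
  by_cases hin : PySem.Str.isIn "/" jid = true
  · rw [if_pos hin, chain_eq_map]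
  · rw [if_neg hin, chain_eq_map]
    have hnm : '/' ∉ jid.toList := by
      have hfalse : PySem.Chars.isIn ['/'] jid.toList = false := by
        have : PySem.Str.isIn "/" jid = false := by
          cases hb : PySem.Str.isIn "/" jid
          · rfl
          · exact absurd hb hin
        simpa [PySem.Str.isIn, hsep] using this
      intro hm
      exact (PySem.Chars.isIn_eq_false_iff ['/'] jid.toList).mp hfalse
        ((List.singleton_infix_iff '/' jid.toList).mpr hm)
    rw [takeWhile_of_not_mem _ _ hnm]
    simp

-- ===== VERDICT (by name: the statement is the Claim_ definition above) =====
theorem sanitize_jid_for_name_py_spec : Claim_equal_sanitize_jid_for_name_py := by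
  intro jid _
  unfold Spec_sanitize_jid_for_name_py
  exact main_equiv jid
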